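-- pv_equiv track=rewrite | github.com/eguinosa/topics-cord19 | doc_tokenizers.py | _is_alpha_underscore
-- ===== SOURCE A (Python) =====
-- def _is_alpha_underscore(word: str):
--     """
--     Check if 'word' is a string of the type 'e_mail', 'ex_wife', etcetera. The
--     word needs to have at least a character between underscores (Ok: e_mail,
--     No: e__mail).
--
--     Args:
--         word: A string with the word we want to check.
--
--     Returns:
--         True, if the word only contains alphabetical characters and underscores.
--     """
--     # Check the word has underscores.
--     if '_' not in word:
--         return False
--
--     # Split Word by underscores and check the tokens.
--     split_words = word.split('_')
--     for word_section in split_words: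
--         if word_section.isalpha():
--             continue
--         else:
--             # All sections need to be alphabetic.
--             return False
--
--     # The word contains only letters and underscores.
--     return True
-- ===== SOURCE B (Python) =====
-- def _is_alpha_underscore(word: str):
--     """Single left-to-right scan: every char must be a letter or an
--     underscore, underscores must be single and strictly internal, and at
--     least one underscore must occur."""
--     ok = True
--     seen = False
--     prev_sep = True  # at the start, an underscore would open an empty section
--     for c in word:
--         if c == '_':
--             ok = ok and not prev_sep
--             seen = True
--             prev_sep = True
--         else:
--             ok = ok and c.isalpha()
--             prev_sep = False
--     return ok and seen and not prev_sep
-- ===== Notes on version B (the rewrite author's own statement) =====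
-- stated objective: alternative
-- what changed: Replaced splitting the word on underscores and checking each section with a single character scan that tracks whether the previous position was a separator (so empty sections are rejected on the spot) and whether any separator was seen.
import Mathlib
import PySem

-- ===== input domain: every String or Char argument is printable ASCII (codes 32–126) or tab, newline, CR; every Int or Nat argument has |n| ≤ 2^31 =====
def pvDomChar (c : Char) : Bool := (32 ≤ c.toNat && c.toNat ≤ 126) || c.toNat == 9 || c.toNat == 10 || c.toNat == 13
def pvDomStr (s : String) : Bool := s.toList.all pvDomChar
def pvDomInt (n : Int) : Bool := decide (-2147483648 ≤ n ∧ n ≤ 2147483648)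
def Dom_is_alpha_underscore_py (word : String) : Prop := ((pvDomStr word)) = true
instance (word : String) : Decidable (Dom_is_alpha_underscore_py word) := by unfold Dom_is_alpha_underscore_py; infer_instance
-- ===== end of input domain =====

-- B replaces A's split('_')-then-check-sections with a single character scan
-- tracking adjacency state; same cost, different decomposition (objective: alternative).

-- ===== PORT A =====
-- the for-loop over the split sections, with its early 'return False'
def loopA : List (List Char) → Bool
  | [] => true
  | s :: rest => if PySem.Chars.strIsalpha s then loopA rest else false

def is_alpha_underscore_py (word : String) : Bool :=
  if !(PySem.Chars.isIn ['_'] word.toList) then false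
  else loopA (PySem.Chars.splitOn word.toList ['_'])

-- ===== PORT B =====
-- the scan loop of Source B: state (ok, seen, prev_sep), one step per character
def bscan : List Char → Bool → Bool → Bool → Bool × Bool × Bool
  | [], ok, seen, prevSep => (ok, seen, prevSep)
  | c :: rest, ok, seen, prevSep =>
    if c = '_' then bscan rest (ok && !prevSep) true true
    else bscan rest (ok && PySem.Chars.isalpha c) seen false

def is_alpha_underscore_py_alt (word : String) : Bool :=
  let st := bscan word.toList true false true
  st.1 && st.2.1 && !st.2.2

-- ===== PRECONDITION & SPEC =====
def Spec_is_alpha_underscore_py (word : String) (out : Bool) : Prop := out = is_alpha_underscore_py_alt word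
instance (word : String) (out : Bool) : Decidable (Spec_is_alpha_underscore_py word out) := by unfold Spec_is_alpha_underscore_py; infer_instance

-- ===== CLAIM (what is proved, stated in full; the proofs are below) =====
def Claim_equal_is_alpha_underscore_py : Prop := ∀ (word : String), Dom_is_alpha_underscore_py word → Spec_is_alpha_underscore_py word (is_alpha_underscore_py word)

-- ===== LEMMAS AND PROOFS =====

-- reference shape of Python's split on the single separator '_'
def splitU : List Char → List (List Char)
  | [] => [[]]
  | c :: rest =>
    if c = '_' then [] :: splitU rest
    else (c :: (splitU rest).headI) :: (splitU rest).tail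

theorem splitU_eq (cs : List Char) : splitU cs = (splitU cs).headI :: (splitU cs).tail := by
  cases cs with
  | nil => simp [splitU]
  | cons c rest => by_cases h : c = '_' <;> simp [splitU, h]

theorem go_spec (cs : List Char) : ∀ (fuel : Nat) (cur : List Char) (acc : List (List Char)),
    cs.length < fuel →
    PySem.Chars.splitOn.go ['_'] fuel cs cur acc
      = acc.reverse ++ (cur.reverse ++ (splitU cs).headI) :: (splitU cs).tail := by
  induction cs with
  | nil =>
    intro fuel cur acc h
    cases fuel with
    | zero => omega
    | succ f => simp [PySem.Chars.splitOn.go, splitU]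
  | cons c rest ih =>
    intro fuel cur acc h
    cases fuel with
    | zero => simp at h
    | succ f =>
      by_cases hc : c = '_'
      · subst hc
        simp only [PySem.Chars.splitOn.go, List.isPrefixOf, BEq.rfl, Bool.true_and,
          if_true, List.length_cons, List.drop_succ_cons, List.length_nil, List.drop_zero]
        rw [ih f [] (cur.reverse :: acc) (by simpa using h)]
        simp [splitU]
        exact (splitU_eq rest).symm
      · have hpre : (['_'].isPrefixOf (c :: rest)) = false := by
          simp [List.isPrefixOf]
          exact fun hh => (hc hh.symm).elim
        simp only [PySem.Chars.splitOn.go, hpre, Bool.false_eq_true, if_false]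
        rw [ih f (c :: cur) acc (by simpa using h)]
        simp [splitU, hc]

theorem splitOn_underscore (cs : List Char) :
    PySem.Chars.splitOn cs ['_'] = splitU cs := by
  unfold PySem.Chars.splitOn
  rw [go_spec cs (cs.length + 1) [] [] (by omega)]
  simpa using (splitU_eq cs).symm

theorem loopA_eq_all (ls : List (List Char)) : loopA ls = ls.all PySem.Chars.strIsalpha := by
  induction ls with
  | nil => rfl
  | cons s rest ih => by_cases h : PySem.Chars.strIsalpha s <;> simp [loopA, h, ih]

theorem isIn_underscore (cs : List Char) :
    PySem.Chars.isIn ['_'] cs = cs.contains '_' := by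
  by_cases h : '_' ∈ cs
  · have : ['_'] <:+: cs := by
      obtain ⟨s, t, rfl⟩ := List.append_of_mem h
      exact ⟨s, t, by simp⟩
    simp [(PySem.Chars.isIn_iff_infix _ _).mpr this, h]
  · have : ¬ ['_'] <:+: cs := fun hin => h (hin.subset (by simp))
    have h1 : PySem.Chars.isIn ['_'] cs = false := (PySem.Chars.isIn_eq_false_iff _ _).mpr this
    have h2 : cs.contains '_' = false := by simpa using h
    rw [h1, h2]

theorem bscan_invariant (cs : List Char) :
    ∀ (ok seen prevSep : Bool),
    (let st := bscan cs ok seen prevSep; st.1 && st.2.1 && !st.2.2)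
      = (ok && (seen || cs.contains '_')
          && ((splitU cs).headI.all PySem.Chars.isalpha && (!prevSep || !(splitU cs).headI.isEmpty))
          && (splitU cs).tail.all PySem.Chars.strIsalpha) := by
  induction cs with
  | nil =>
    intro ok seen prevSep
    simp [bscan, splitU]
  | cons c rest ih =>
    intro ok seen prevSep
    by_cases hc : c = '_'
    · subst hc
      show (let st := bscan rest (ok && !prevSep) true true; st.1 && st.2.1 && !st.2.2) = _
      rw [ih (ok && !prevSep) true true]
      rw [show splitU ('_' :: rest) = [] :: splitU rest from by simp [splitU]]
      rw [splitU_eq rest]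
      simp only [List.headI_cons, List.tail_cons, List.all_nil, List.isEmpty_nil,
        List.all_cons, List.contains_cons, Bool.true_or, Bool.or_true, Bool.and_true,
        Bool.not_true, Bool.not_false, Bool.or_false, Bool.true_and,
        PySem.Chars.strIsalpha]
      cases ok <;> cases prevSep <;>
        simp [Bool.and_comm, Bool.and_assoc]
    · rw [show bscan (c :: rest) ok seen prevSep
            = bscan rest (ok && PySem.Chars.isalpha c) seen false from by simp [bscan, hc]]
      rw [ih (ok && PySem.Chars.isalpha c) seen false]
      rw [show splitU (c :: rest) = (c :: (splitU rest).headI) :: (splitU rest).tail from by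
        simp [splitU, hc]]
      have hbeq : ('_' == c) = false := beq_eq_false_iff_ne.mpr fun hh => hc hh.symm
      have hcont : (c :: rest).contains '_' = rest.contains '_' := by
        simp only [List.contains_cons, hbeq, Bool.false_or]
      rw [hcont]
      simp only [List.headI_cons, List.tail_cons, List.all_cons, List.isEmpty_cons,
        Bool.not_false, Bool.or_true, Bool.true_and, Bool.and_true]
      cases ok <;> cases seen <;>
        simp [Bool.and_comm, Bool.and_left_comm, Bool.and_assoc]

theorem main_eq (word : String) :
    is_alpha_underscore_py word = is_alpha_underscore_py_alt word := by
  unfold is_alpha_underscore_py is_alpha_underscore_py_alt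
  rw [bscan_invariant word.toList true false true]
  rw [splitOn_underscore, loopA_eq_all, isIn_underscore]
  rw [show (splitU word.toList).all PySem.Chars.strIsalpha
        = ((splitU word.toList).headI :: (splitU word.toList).tail).all PySem.Chars.strIsalpha from by
    rw [← splitU_eq]]
  simp only [List.all_cons, PySem.Chars.strIsalpha, Bool.false_or,
    Bool.true_and, Bool.not_true, Bool.not_false, Bool.or_false]
  cases h : List.contains word.toList '_' <;>
    simp [Bool.and_comm, Bool.and_left_comm, Bool.and_assoc]

-- ===== VERDICT (by name: the statement is the Claim_ definition above) =====
theorem is_alpha_underscore_py_spec : Claim_equal_is_alpha_underscore_py := by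
  intro word _
  unfold Spec_is_alpha_underscore_py
  exact main_eq word
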